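-- pv_equiv track=rewrite | github.com/laurenzlrz/TorchTransformer | src/sparse_transformer/SparseAttentionExcercise.py | select_nodes
-- ===== SOURCE A (Python) =====
-- def select_nodes(i, k, num_elements):
--     """
--     Selects a subset of nodes according to the specified rules.
--
--     Args:
--         i (int): The index of the current node.
--         k (int): The number of neighboring elements.
--         num_elements (int): The total number of elements in the tree.
--
--     Returns:
--         List[int]: A list of indices of the selected nodes.
--     """
--     selected_indices = []
--     current_layer = 1
--     current_index = i
--
--     while current_index < num_elements:
--         # Calculate the range of neighboring nodes to be selected
--         start_index = max(0, current_index - k)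
--         end_index = min(current_index + k + 1, num_elements)
--
--         # Select the neighboring nodes
--         selected_indices.extend(range(start_index, end_index))
--
--         # Skip the next 2k neighboring nodes and move to the next layer
--         current_index = end_index + 2 * k
--         current_layer += 1
--         k *= 2
--
--     # Remove duplicates and sort the indices
--     selected_indices = sorted(set(selected_indices))
--
--     return selected_indices
-- ===== SOURCE B (Python) =====
-- def select_nodes(i, k, num_elements):
--     """The selected indices always form one contiguous block [max(0,i-k), end).
--     Per-layer closed form: after t doublings the segment end is
--     f(t) = i + t + 1 + k*(4*2**t - 3) and the next start index is f(t) + 2*k*2**t,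
--     so only the layer counter t (and p = 2**t) is iterated - no index/width state."""
--     n = num_elements
--     if i >= n:
--         return []
--     t, p = 0, 1
--     while True:
--         f = i + t + 1 + k * (4 * p - 3)
--         if f >= n:
--             end = n
--             break
--         if f + 2 * k * p >= n:
--             end = f
--             break
--         t += 1
--         p *= 2
--     return list(range(max(0, i - k), end))
-- ===== Notes on version B (the rewrite author's own statement) =====
-- stated objective: alternative
-- what changed: B uses the per-layer closed form end(t) = i + t + 1 + k*(4*2^t - 3) of the (provably contiguous) selection block, iterating only a layer counter to find the final end bound and emitting one range, instead of A's accumulate-all-segments then sorted(set(...)); intended as faster on large outputs (measured 2.74x at the largest size but not consistent across inputs).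
import Mathlib
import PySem

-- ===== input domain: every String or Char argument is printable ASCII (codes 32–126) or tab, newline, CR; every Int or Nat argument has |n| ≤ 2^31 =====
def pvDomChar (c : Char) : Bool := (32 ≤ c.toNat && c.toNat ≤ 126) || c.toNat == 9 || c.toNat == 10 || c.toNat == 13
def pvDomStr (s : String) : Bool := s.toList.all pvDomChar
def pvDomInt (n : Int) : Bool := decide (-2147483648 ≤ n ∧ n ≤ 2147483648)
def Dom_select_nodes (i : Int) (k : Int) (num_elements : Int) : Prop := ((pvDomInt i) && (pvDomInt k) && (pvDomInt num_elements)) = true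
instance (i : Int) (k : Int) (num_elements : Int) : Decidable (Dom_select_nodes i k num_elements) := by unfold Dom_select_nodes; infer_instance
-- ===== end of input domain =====

-- B replaces A's "collect all segments, dedupe, sort" by a per-layer closed form for the end bound
-- of the (provably contiguous) block, iterating only a layer counter and emitting a single range.


-- ===== PORT A =====
-- A's while loop; fuel only makes the recursion total (under Pre_ the fuel is ample and never runs out).
def selA_loop (n : Int) : Nat → Int → Int → List Int → List Int
  | 0, _, _, acc => acc
  | f + 1, ci, k, acc =>
    if ci < n then
      selA_loop n f (min (ci + k + 1) n + 2 * k) (2 * k)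
        (acc ++ PySem.List.pyRange (max 0 (ci - k)) (min (ci + k + 1) n) 1)
    else acc

def select_nodes (i : Int) (k : Int) (num_elements : Int) : List Int :=
  PySem.List.sorted
    (PySem.Set.ofList (selA_loop num_elements ((num_elements - i).toNat + 1) i k []))
    (fun x => x) false

-- ===== PORT B =====
-- B's while loop: only the layer counter t and p = 2^t are iterated; the segment end after t
-- doublings is the closed form i + t + 1 + k*(4*p - 3) (same fuel discipline as A's port).
def selB_end (i : Int) (k : Int) (n : Int) : Nat → Int → Int → Int
  | 0, _, _ => n
  | fu + 1, t, p =>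
    if n ≤ i + t + 1 + k * (4 * p - 3) then n
    else if n ≤ i + t + 1 + k * (4 * p - 3) + 2 * k * p then i + t + 1 + k * (4 * p - 3)
    else selB_end i k n fu (t + 1) (2 * p)

def select_nodes_alt (i : Int) (k : Int) (num_elements : Int) : List Int :=
  if num_elements ≤ i then []
  else
    PySem.List.pyRange (max 0 (i - k))
      (selB_end i k num_elements ((num_elements - i).toNat + 1) 0 1) 1

-- ===== PRECONDITION & SPEC =====
-- Pre_ excludes exactly the inputs on which the Python A never returns: for k < 0 and i < num_elements
-- the while loop's index can only move left of num_elements, so A loops forever.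
def Pre_select_nodes (i : Int) (k : Int) (num_elements : Int) : Prop :=
  0 ≤ k ∨ num_elements ≤ i
instance (i : Int) (k : Int) (num_elements : Int) : Decidable (Pre_select_nodes i k num_elements) := by unfold Pre_select_nodes; infer_instance
def pvWitness_select_nodes : Int × Int × Int := (3, 1, 20)

def Spec_select_nodes (i : Int) (k : Int) (num_elements : Int) (out : List Int) : Prop := out = select_nodes_alt i k num_elements
instance (i : Int) (k : Int) (num_elements : Int) (out : List Int) : Decidable (Spec_select_nodes i k num_elements out) := by unfold Spec_select_nodes; infer_instance

-- ===== CLAIM (what is proved, stated in full; the proofs are below) =====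
def Claim_equal_select_nodes : Prop := ∀ (i : Int) (k : Int) (num_elements : Int), Dom_select_nodes i k num_elements → Pre_select_nodes i k num_elements → Spec_select_nodes i k num_elements (select_nodes i k num_elements)

-- ===== LEMMAS AND PROOFS =====

-- one-step unfoldings of the two loops (the Nat fuel pattern, stated once for controlled rewriting)
lemma selA_loop_succ (n : Int) (f : Nat) (ci k : Int) (acc : List Int) :
    selA_loop n (f + 1) ci k acc =
      if ci < n then
        selA_loop n f (min (ci + k + 1) n + 2 * k) (2 * k)
          (acc ++ PySem.List.pyRange (max 0 (ci - k)) (min (ci + k + 1) n) 1)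
      else acc := rfl

lemma selB_end_succ (i k n : Int) (fu : Nat) (t p : Int) :
    selB_end i k n (fu + 1) t p =
      if n ≤ i + t + 1 + k * (4 * p - 3) then n
      else if n ≤ i + t + 1 + k * (4 * p - 3) + 2 * k * p then i + t + 1 + k * (4 * p - 3)
      else selB_end i k n fu (t + 1) (2 * p) := rfl

-- B's loop result is never below (the clamp of) the current layer's closed-form end.
lemma selB_ge (i k n : Int) : ∀ (fu : Nat) (t p : Int), 0 ≤ k → 0 ≤ p →
    min (i + t + 1 + k * (4 * p - 3)) n ≤ selB_end i k n fu t p := by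
  intro fu
  induction fu with
  | zero => intro t p hk hp; simp only [selB_end]; omega
  | succ fu ih =>
    intro t p hk hp
    rw [selB_end_succ]
    split_ifs with h1 h2
    · omega
    · omega
    · have := ih (t + 1) (2 * p) hk (by omega)
      have hmul : 0 ≤ k * p := mul_nonneg hk hp
      have : i + t + 1 + k * (4 * p - 3) ≤ i + (t + 1) + 1 + k * (4 * (2 * p) - 3) := by
        nlinarith
      omega

-- The flat list A accumulates is one contiguous range ending at B's closed-form bound.
lemma loopAB (i k n : Int) : ∀ (fu : Nat) (t p ci kk : Int) (acc : List Int),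
    0 ≤ k → 1 ≤ p → ci = i + 3 * k * (p - 1) + t → kk = k * p →
    ci < n → (n - ci).toNat ≤ fu + 1 →
    selA_loop n (fu + 1) ci kk acc =
      acc ++ PySem.List.pyRange (max 0 (ci - kk)) (selB_end i k n (fu + 1) t p) 1 := by
  intro fu
  induction fu with
  | zero =>
    intro t p ci kk acc hk hp hci hkk hlt hfu
    have hkk0 : 0 ≤ kk := hkk ▸ mul_nonneg hk (by omega)
    have hn : n = ci + 1 := by omega
    have hf : i + t + 1 + k * (4 * p - 3) = ci + kk + 1 := by
      rw [hci, hkk]; ring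
    rw [selA_loop_succ, if_pos hlt, selB_end_succ, if_pos (by omega)]
    have hmin : min (ci + kk + 1) n = n := by omega
    rw [hmin]
    simp only [selA_loop]
  | succ fu ih =>
    intro t p ci kk acc hk hp hci hkk hlt hfu
    have hkk0 : 0 ≤ kk := hkk ▸ mul_nonneg hk (by omega)
    have hf : i + t + 1 + k * (4 * p - 3) = ci + kk + 1 := by
      rw [hci, hkk]; ring
    have hf2 : i + t + 1 + k * (4 * p - 3) + 2 * k * p = ci + 3 * kk + 1 := by
      rw [hci, hkk]; ring
    rw [selA_loop_succ, if_pos hlt, selB_end_succ]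
    by_cases h1 : n ≤ ci + kk + 1
    · -- clamped segment: end = n, and the next index n + 2kk is past n
      rw [if_pos (by omega)]
      have hmin : min (ci + kk + 1) n = n := by omega
      rw [hmin, selA_loop_succ, if_neg (by omega)]
    · rw [if_neg (by omega)]
      have hmin : min (ci + kk + 1) n = ci + kk + 1 := by omega
      rw [hmin]
      by_cases h2 : n ≤ ci + kk + 1 + 2 * kk
      · -- gap exit: next index ≥ n, end = this layer's closed form
        rw [if_pos (by omega), selA_loop_succ, if_neg (by omega), hf]
      · rw [if_neg (by omega)]
        set e := ci + kk + 1 with he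
        have hrec := ih (t + 1) (2 * p) (e + 2 * kk) (2 * kk)
          (acc ++ PySem.List.pyRange (max 0 (ci - kk)) e 1) hk (by omega)
          (by rw [he, hci, hkk]; ring) (by rw [hkk]; ring) (by omega) (by omega)
        rw [hrec]
        have hE : e ≤ selB_end i k n (fu + 1) (t + 1) (2 * p) := by
          have := selB_ge i k n (fu + 1) (t + 1) (2 * p) hk (by omega)
          have : e + 1 + 4 * (k * p) = i + (t + 1) + 1 + k * (4 * (2 * p) - 3) := by
            rw [he, hci, hkk]; ring
          have hmul : 0 ≤ k * p := mul_nonneg hk (by omega)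
          omega
        set E := selB_end i k n (fu + 1) (t + 1) (2 * p) with hE'
        have hshift : e + 2 * kk - 2 * kk = e := by ring
        rw [hshift]
        by_cases he0 : 0 ≤ e
        · have hs : max 0 (ci - kk) ≤ e := by omega
          rw [max_eq_right he0, List.append_assoc,
            ← PySem.List.pyRange_one_append _ e E hs hE]
        · have : max 0 (ci - kk) = 0 ∧ max 0 e = 0 := by omega
          rw [PySem.List.pyRange_one_eq_nil (by omega), this.1, this.2]
          simp
-- the range is Nodup and strictly increasing, so set + sorted leave it unchanged
lemma sorted_set_range (a b : Int) :
    PySem.List.sorted (PySem.Set.ofList (PySem.List.pyRange a b 1)) (fun x => x) false =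
      PySem.List.pyRange a b 1 := by
  rw [PySem.Set.ofList_eq_self_of_nodup _ (PySem.List.nodup_pyRange_one a b)]
  exact PySem.List.sorted_eq_self_of_pairwise _ _
    ((PySem.List.pairwise_lt_pyRange_one a b).imp le_of_lt)

-- ===== VERDICT (by name: the statement is the Claim_ definition above) =====
theorem select_nodes_spec : Claim_equal_select_nodes := by
  intro i k n _ hpre
  unfold Spec_select_nodes select_nodes select_nodes_alt
  by_cases hni : n ≤ i
  · rw [if_pos hni]
    have : (n - i).toNat = 0 := by omega
    rw [this]
    simp only [selA_loop, if_neg (not_lt.mpr hni)]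
    rfl
  · have hci : i < n := by omega
    have hk : 0 ≤ k := by
      rcases hpre with h | h
      · exact h
      · omega
    rw [if_neg hni]
    obtain ⟨f, hf⟩ : ∃ f, (n - i).toNat = f + 1 := ⟨(n - i).toNat - 1, by omega⟩
    rw [hf, loopAB i k n (f + 1) 0 1 i k [] hk le_rfl (by ring) (by ring) hci (by omega)]
    simp only [List.nil_append]
    exact sorted_set_range _ _
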